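-- pv_equiv track=rewrite | github.com/kaiyuantest/DeskLibrary | src/main/python_cookie_bridge.py | group_cookies_by_root_domain
-- ===== SOURCE A (Python) =====
-- def group_cookies_by_root_domain(cookies: list) -> dict:
--     grouped = {}
--     for cookie in cookies:
--         domain = str(cookie.get("domain", "")).lstrip(".")
--         parts = domain.split(".")
--         root = "." + ".".join(parts[-2:]) if len(parts) >= 2 else ("." + domain if domain else "")
--         grouped.setdefault(root, []).append(cookie)
--     return grouped
-- ===== SOURCE B (Python) =====
-- def group_cookies_by_root_domain(cookies: list) -> dict:
--     def root_key(cookie):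
--         domain = str(cookie.get("domain", "")).lstrip(".")
--         parts = domain.split(".")
--         return "." + ".".join(parts[-2:]) if len(parts) >= 2 else ("." + domain if domain else "")
--     keys = list(dict.fromkeys(root_key(c) for c in cookies))
--     return {k: [c for c in cookies if root_key(c) == k] for k in keys}
-- ===== Notes on version B (the rewrite author's own statement) =====
-- stated objective: alternative
-- what changed: Replaces the incremental setdefault-append dict loop by a two-phase comprehension: first dedup the root-domain keys in first-occurrence order, then build each group with a per-key filter over the cookie list.
import Mathlib
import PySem

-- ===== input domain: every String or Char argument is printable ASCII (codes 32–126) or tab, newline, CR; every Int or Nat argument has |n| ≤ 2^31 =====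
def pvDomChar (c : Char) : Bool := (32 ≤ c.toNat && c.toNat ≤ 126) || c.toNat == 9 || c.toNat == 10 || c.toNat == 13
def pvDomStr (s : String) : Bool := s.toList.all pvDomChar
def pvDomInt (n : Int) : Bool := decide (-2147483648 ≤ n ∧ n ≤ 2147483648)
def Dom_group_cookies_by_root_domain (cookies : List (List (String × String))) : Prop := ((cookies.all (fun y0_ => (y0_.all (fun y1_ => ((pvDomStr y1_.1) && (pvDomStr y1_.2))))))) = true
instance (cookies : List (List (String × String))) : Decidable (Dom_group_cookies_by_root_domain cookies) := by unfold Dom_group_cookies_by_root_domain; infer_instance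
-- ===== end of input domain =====

-- B replaces A's incremental setdefault/append dict loop by a two-phase decomposition:
-- dedup the root-domain keys in first-occurrence order, then build each group by a per-key filter (alternative; not claimed faster).

-- The root-domain key expression, identical in both Pythons.
-- cookie.get("domain","") = dict lookup; .lstrip(".") ported by hand as dropWhile (· == '.') — exact;
-- domain.split(".") has a nonempty separator, so split? always returns some and .getD [] is exact.
def rootKey (cookie : List (String × String)) : String :=
  let domain : String :=
    String.ofList (((PySem.Dict.ofList cookie).getD "domain" "").toList.dropWhile (· == '.'))
  let parts := (PySem.Str.split? domain ".").getD []
  if parts.length ≥ 2 then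
    "." ++ PySem.Str.join "." (PySem.List.slice parts (some (-2)) none)
  else if domain ≠ "" then "." ++ domain else ""

-- ===== PORT A =====
-- grouped.setdefault(root, []).append(cookie) is grouped[root] = grouped.get(root, []) + [cookie], i.e. Dict.modify.
def group_cookies_by_root_domain (cookies : List (List (String × String))) : List (String × List (List (String × String))) :=
  (cookies.foldl
    (fun grouped cookie => grouped.modify (rootKey cookie) [] (· ++ [cookie]))
    PySem.Dict.empty).items

-- ===== PORT B =====
def group_cookies_by_root_domain_alt (cookies : List (List (String × String))) : List (String × List (List (String × String))) :=
  let keys := PySem.List.dedup (cookies.map rootKey)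
  keys.map (fun k => (k, cookies.filter (fun c => rootKey c == k)))

-- ===== PRECONDITION & SPEC =====
def Spec_group_cookies_by_root_domain (cookies : List (List (String × String))) (out : List (String × List (List (String × String)))) : Prop := out = group_cookies_by_root_domain_alt cookies
instance (cookies : List (List (String × String))) (out : List (String × List (List (String × String)))) : Decidable (Spec_group_cookies_by_root_domain cookies out) := by unfold Spec_group_cookies_by_root_domain; infer_instance

-- ===== CLAIM (what is proved, stated in full; the proofs are below) =====
def Claim_equal_group_cookies_by_root_domain : Prop := ∀ (cookies : List (List (String × String))), Dom_group_cookies_by_root_domain cookies → Spec_group_cookies_by_root_domain cookies (group_cookies_by_root_domain cookies)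

-- ===== LEMMAS AND PROOFS =====

-- The grouping dict's entry at k collects, in order, exactly the cookies whose root key is k.
theorem getD_fold_eq_filter (cookies : List (List (String × String))) (k : String) :
    (cookies.foldl (fun d c => d.modify (rootKey c) [] (· ++ [c])) PySem.Dict.empty).getD k []
    = cookies.filter (fun c => rootKey c == k) := by
  have h := PySem.Dict.getD_foldl_modify_append (cookies.map (fun c => (rootKey c, c))) (PySem.Dict.empty) k
  rw [List.foldl_map] at h
  simpa [List.filter_map, Function.comp_def] using h

-- ===== VERDICT (by name: the statement is the Claim_ definition above) =====
theorem group_cookies_by_root_domain_spec : Claim_equal_group_cookies_by_root_domain := by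
  intro cookies _
  unfold Spec_group_cookies_by_root_domain
  unfold group_cookies_by_root_domain group_cookies_by_root_domain_alt
  have hnd := PySem.Dict.nodup_keys_foldl_modify_key cookies rootKey [] (fun _ c => (· ++ [c])) PySem.Dict.empty (by simp)
  rw [PySem.Dict.items_eq_map_keys _ hnd []]
  rw [PySem.Dict.keys_foldl_modify_key cookies rootKey [] (fun _ c => (· ++ [c])) PySem.Dict.empty]
  simp only [PySem.Dict.keys_empty, PySem.Set.update_nil_left, PySem.List.dedup_eq_ofList]
  exact List.map_congr_left (fun k _ => by rw [getD_fold_eq_filter])
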